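-- pv_equiv track=rewrite | github.com/tyates97/Calculator | Main.py | minus_one_from_digit
-- ===== SOURCE A (Python) =====
-- def rest_are_zeros(lis, digit):
--     for i in range(digit):
--         if lis[i] is '1':
--             return False
--     return True
--
-- def minus_one_from_digit(binary_list, digit):
--     if binary_list[digit] is '1':
--         binary_list[digit] = '0'
--         # checks if rest of digits are zeros - will be true if subtracting a larger number from a smaller.
--     elif rest_are_zeros(binary_list, digit):
--         binary_list = ['-'] + binary_list
--     else:
--         binary_list[digit] = '1'
--         minus_one_from_digit(binary_list, digit-1)
--     return binary_list
-- ===== SOURCE B (Python) =====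
-- def minus_one_from_digit(binary_list, digit):
--     # One downward scan to the nearest '1' at or below `digit`, clear it,
--     # then one fill pass setting everything between it and `digit` to '1'.
--     if binary_list[digit] == '1':
--         binary_list[digit] = '0'
--         return binary_list
--     j = digit - 1
--     while j >= 0 and binary_list[j] != '1':
--         j -= 1
--     if j < 0:
--         return ['-'] + binary_list
--     binary_list[j] = '0'
--     for k in range(j + 1, digit + 1):
--         binary_list[k] = '1'
--     return binary_list
-- ===== Notes on version B (the rewrite author's own statement) =====
-- stated objective: alternative
-- what changed: Replaces A's recursion that rescans all lower digits at every borrow step with a single downward scan to the nearest '1' plus one fill pass.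
import Mathlib
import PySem

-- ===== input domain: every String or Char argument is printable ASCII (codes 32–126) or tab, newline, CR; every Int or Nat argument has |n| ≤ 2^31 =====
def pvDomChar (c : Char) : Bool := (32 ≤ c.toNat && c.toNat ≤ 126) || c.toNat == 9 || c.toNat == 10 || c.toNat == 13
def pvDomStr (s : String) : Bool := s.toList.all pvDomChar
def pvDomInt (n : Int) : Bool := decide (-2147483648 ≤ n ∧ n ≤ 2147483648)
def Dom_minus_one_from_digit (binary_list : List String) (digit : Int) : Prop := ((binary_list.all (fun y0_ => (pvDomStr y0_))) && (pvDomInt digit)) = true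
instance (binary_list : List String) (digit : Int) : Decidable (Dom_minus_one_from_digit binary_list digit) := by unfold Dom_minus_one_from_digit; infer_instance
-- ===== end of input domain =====

-- B replaces A's recursion-with-rescans (each borrow step rescans all lower digits) by one
-- downward scan to the nearest '1' followed by one fill pass.
-- Both A and B mutate binary_list in place in Python (except in the '-' branch); the
-- equivalence proved here is about the RETURN value.
-- Python's 'is' comparison with the literal '1' is ported as equality with "1" (single-char
-- ASCII strings are interned in CPython).

-- ===== PORT A =====
def rest_are_zeros (lis : List String) (digit : Int) : Bool :=
  -- for i in range(digit): if lis[i] is '1': return False / return True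
  (PySem.List.pyRange 0 digit 1).all (fun i => !(PySem.List.pyGetD lis i "" == "1"))

-- termination helper for A's recursion, cited by decreasing_by
theorem rest_are_zeros_false_pos (lis : List String) (digit : Int)
    (h : rest_are_zeros lis digit = false) : 1 ≤ digit := by
  by_contra hlt
  rw [rest_are_zeros, PySem.List.pyRange_one_eq_nil (by omega)] at h
  simp at h

def minus_one_from_digit (binary_list : List String) (digit : Int) : List String :=
  if PySem.List.pyGetD binary_list digit "" == "1" then
    PySem.List.pySetD binary_list digit "0"
  else if h : rest_are_zeros binary_list digit = true then
    "-" :: binary_list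
  else
    minus_one_from_digit (PySem.List.pySetD binary_list digit "1") (digit - 1)
termination_by digit.toNat
decreasing_by
  have := rest_are_zeros_false_pos binary_list digit (by simpa using h)
  omega

-- ===== PORT B =====
-- while j >= 0 and binary_list[j] != '1': j -= 1
def mofd_scan (lis : List String) (j : Int) : Int :=
  if 0 ≤ j then
    if PySem.List.pyGetD lis j "" == "1" then j
    else mofd_scan lis (j - 1)
  else j
termination_by (j + 1).toNat
decreasing_by omega

def minus_one_from_digit_alt (binary_list : List String) (digit : Int) : List String :=
  if PySem.List.pyGetD binary_list digit "" == "1" then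
    PySem.List.pySetD binary_list digit "0"
  else
    let j := mofd_scan binary_list (digit - 1)
    if j < 0 then
      "-" :: binary_list
    else
      (PySem.List.pyRange (j + 1) (digit + 1) 1).foldl
        (fun acc k => PySem.List.pySetD acc k "1")
        (PySem.List.pySetD binary_list j "0")

-- ===== PRECONDITION & SPEC =====
-- Pre_ excludes exactly the inputs on which A raises IndexError: digit outside Python's
-- index range [-len, len).
def Pre_minus_one_from_digit (binary_list : List String) (digit : Int) : Prop :=
  -(binary_list.length : Int) ≤ digit ∧ digit < (binary_list.length : Int)
instance (binary_list : List String) (digit : Int) : Decidable (Pre_minus_one_from_digit binary_list digit) := by unfold Pre_minus_one_from_digit; infer_instance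

def pvWitness_minus_one_from_digit : List String × Int := (["1", "0", "1", "0"], 3)

def Spec_minus_one_from_digit (binary_list : List String) (digit : Int) (out : List String) : Prop := out = minus_one_from_digit_alt binary_list digit
instance (binary_list : List String) (digit : Int) (out : List String) : Decidable (Spec_minus_one_from_digit binary_list digit out) := by unfold Spec_minus_one_from_digit; infer_instance

-- ===== CLAIM =====
def Claim_equal_minus_one_from_digit : Prop := ∀ (binary_list : List String) (digit : Int), Dom_minus_one_from_digit binary_list digit → Pre_minus_one_from_digit binary_list digit → Spec_minus_one_from_digit binary_list digit (minus_one_from_digit binary_list digit)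

-- ===== LEMMAS AND PROOFS =====
theorem scan_neg (lis : List String) (d : Int) (h : d < 0) : mofd_scan lis d = d := by
  rw [mofd_scan]; simp [show ¬ (0:Int) ≤ d by omega]

theorem scan_self (lis : List String) (d : Int) (h0 : 0 ≤ d)
    (h : (PySem.List.pyGetD lis d "" == "1") = true) : mofd_scan lis d = d := by
  rw [mofd_scan]; simp [h0, h]

theorem scan_step (lis : List String) (d : Int) (h0 : 0 ≤ d)
    (h : ¬ (PySem.List.pyGetD lis d "" == "1") = true) : mofd_scan lis d = mofd_scan lis (d - 1) := by
  rw [mofd_scan]; simp [h0, h]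

theorem scan_le (lis : List String) (d : Int) : mofd_scan lis d ≤ d := by
  induction d using mofd_scan.induct lis with
  | case1 d h0 h1 => rw [scan_self lis d h0 h1]
  | case2 d h0 h1 ih => rw [scan_step lis d h0 h1]; omega
  | case3 d h0 => rw [mofd_scan]; simp [h0]

theorem scan_none (lis : List String) (d : Int)
    (h : ∀ i : Int, 0 ≤ i → i ≤ d → ¬ (PySem.List.pyGetD lis i "" == "1") = true) :
    mofd_scan lis d < 0 := by
  induction d using mofd_scan.induct lis with
  | case1 d h0 h1 => exact absurd h1 (h d h0 le_rfl)
  | case2 d h0 h1 ih =>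
    rw [scan_step lis d h0 h1]
    exact ih (fun i hi hi' => h i hi (by omega))
  | case3 d h0 => rw [mofd_scan]; simp [h0]; omega

theorem scan_some (lis : List String) (d : Int) (i : Int) (hi0 : 0 ≤ i) (hid : i ≤ d)
    (h : (PySem.List.pyGetD lis i "" == "1") = true) : 0 ≤ mofd_scan lis d := by
  induction d using mofd_scan.induct lis with
  | case1 d h0 h1 => rw [scan_self lis d h0 h1]; exact h0
  | case2 d h0 h1 ih =>
    rw [scan_step lis d h0 h1]
    have hne : i ≠ d := fun he => h1 (he ▸ h)
    exact ih (by omega)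
  | case3 d h0 => omega

theorem scan_congr (l1 l2 : List String) (d : Int)
    (h : ∀ i : Int, 0 ≤ i → i ≤ d → PySem.List.pyGetD l1 i "" = PySem.List.pyGetD l2 i "") :
    mofd_scan l1 d = mofd_scan l2 d := by
  induction d using mofd_scan.induct l1 with
  | case1 d h0 h1 =>
    rw [scan_self l1 d h0 h1, scan_self l2 d h0 (by rw [← h d h0 le_rfl]; exact h1)]
  | case2 d h0 h1 ih =>
    rw [scan_step l1 d h0 h1, scan_step l2 d h0 (by rw [← h d h0 le_rfl]; exact h1)]
    exact ih (fun i hi hi' => h i hi (by omega))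
  | case3 d h0 => rw [scan_neg l1 d (by omega), scan_neg l2 d (by omega)]

theorem rz_iff (lis : List String) (d : Int) :
    rest_are_zeros lis d = true ↔
      ∀ i : Int, 0 ≤ i → i < d → ¬ (PySem.List.pyGetD lis i "" == "1") = true := by
  rw [rest_are_zeros]
  simp [List.all_eq_true, PySem.List.mem_pyRange_one]

theorem foldl_set_comm (dn : Nat) (v : String) :
    ∀ (l : List Int) (X : List String), (∀ k ∈ l, 0 ≤ k ∧ k.toNat ≠ dn) →
      l.foldl (fun acc k => PySem.List.pySetD acc k "1") (X.set dn v)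
        = (l.foldl (fun acc k => PySem.List.pySetD acc k "1") X).set dn v := by
  intro l
  induction l with
  | nil => intro X _; rfl
  | cons k l ih =>
    intro X hk
    have hk0 : 0 ≤ k := (hk k (by simp)).1
    have hkd : k.toNat ≠ dn := (hk k (by simp)).2
    simp only [List.foldl_cons]
    rw [PySem.List.pySetD_of_nonneg _ _ hk0, PySem.List.pySetD_of_nonneg _ _ hk0,
      List.set_comm _ _ (Ne.symm hkd)]
    exact ih _ (fun j hj => hk j (List.mem_cons_of_mem _ hj))

theorem pyGetD_set_above (lis : List String) (d i : Int) (v : String)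
    (h0 : 0 ≤ i) (hid : i < d) (hlen : i < (lis.length : Int)) :
    PySem.List.pyGetD (PySem.List.pySetD lis d v) i "" = PySem.List.pyGetD lis i "" := by
  rw [PySem.List.pySetD_of_nonneg _ _ (by omega : (0:Int) ≤ d)]
  rw [PySem.List.pyGetD_eq_getElem _ _ h0 (by simpa using hlen),
      PySem.List.pyGetD_eq_getElem _ _ h0 hlen]
  exact List.getElem_set_ne (by omega) _

-- proof-only helper: B's branches with the scan started at `digit` itself (B's first branch
-- coincides with the scan stopping at `digit`); used as the induction target for `main_pos`.
def mofd_old (binary_list : List String) (digit : Int) : List String :=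
  let j := mofd_scan binary_list digit
  if j < 0 then
    "-" :: binary_list
  else
    (PySem.List.pyRange (j + 1) (digit + 1) 1).foldl
      (fun acc k => PySem.List.pySetD acc k "1")
      (PySem.List.pySetD binary_list j "0")

theorem alt_eq_old (lis : List String) (d : Int) (h0 : 0 ≤ d) :
    minus_one_from_digit_alt lis d = mofd_old lis d := by
  by_cases h1 : (PySem.List.pyGetD lis d "" == "1") = true
  · rw [minus_one_from_digit_alt, if_pos h1, mofd_old]
    rw [scan_self lis d h0 h1]
    rw [if_neg (by omega : ¬ d < 0), PySem.List.pyRange_one_eq_nil le_rfl, List.foldl_nil]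
  · rw [minus_one_from_digit_alt, if_neg h1, mofd_old, scan_step lis d h0 h1]

theorem main_pos : ∀ (n : Nat) (lis : List String) (d : Int), d.toNat < n → 0 ≤ d →
    d < (lis.length : Int) →
    minus_one_from_digit lis d = mofd_old lis d := by
  intro n
  induction n with
  | zero => intro lis d h; omega
  | succ n ih =>
    intro lis d hdn h0 hlen
    by_cases h1 : (PySem.List.pyGetD lis d "" == "1") = true
    · rw [minus_one_from_digit, if_pos h1, mofd_old]
      rw [scan_self lis d h0 h1]
      rw [if_neg (by omega : ¬ d < 0), PySem.List.pyRange_one_eq_nil le_rfl, List.foldl_nil]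
    · by_cases h2 : rest_are_zeros lis d = true
      · rw [minus_one_from_digit, if_neg h1, dif_pos h2, mofd_old]
        have hlt : mofd_scan lis d < 0 := by
          refine scan_none lis d (fun i hi hid => ?_)
          rcases lt_or_eq_of_le hid with hlt | he
          · exact (rz_iff lis d).mp h2 i hi hlt
          · exact he ▸ h1
        rw [if_pos hlt]
      · obtain ⟨i, hi0, hid, hi1⟩ : ∃ i : Int, 0 ≤ i ∧ i < d ∧
            (PySem.List.pyGetD lis i "" == "1") = true := by
          by_contra hc
          push Not at hc
          exact h2 ((rz_iff lis d).mpr (fun i h h' hv => hc i h h' hv))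
        have hd1 : 1 ≤ d := by omega
        have hstep : minus_one_from_digit lis d
            = minus_one_from_digit (PySem.List.pySetD lis d "1") (d - 1) := by
          rw [minus_one_from_digit, if_neg h1, dif_neg h2]
        have hlen' : ((PySem.List.pySetD lis d "1").length : Int) = (lis.length : Int) := by
          rw [PySem.List.length_pySetD]
        have hih : minus_one_from_digit (PySem.List.pySetD lis d "1") (d - 1)
            = mofd_old (PySem.List.pySetD lis d "1") (d - 1) :=
          ih _ _ (by omega) (by omega) (by rw [hlen']; omega)
        -- identify the scan results
        have hcongr : mofd_scan (PySem.List.pySetD lis d "1") (d - 1) = mofd_scan lis (d - 1) :=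
          scan_congr _ _ _ (fun i hi hi' => pyGetD_set_above lis d i "1" hi (by omega) (by omega))
        have hscan : mofd_scan lis d = mofd_scan lis (d - 1) := scan_step lis d h0 h1
        have hj0 : 0 ≤ mofd_scan lis d := scan_some lis d i hi0 (by omega) hi1
        have hjle : mofd_scan lis d ≤ d - 1 := hscan ▸ scan_le lis (d - 1)
        rw [hstep, hih, mofd_old, mofd_old]
        rw [hcongr, ← hscan]
        rw [if_neg (by omega : ¬ mofd_scan lis d < 0), if_neg (by omega : ¬ mofd_scan lis d < 0)]
        -- rewrite both bases to List.set form and commute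
        rw [PySem.List.pySetD_of_nonneg _ _ (by omega : (0:Int) ≤ d),
            PySem.List.pySetD_of_nonneg _ _ hj0,
            PySem.List.pySetD_of_nonneg _ _ hj0,
            List.set_comm _ _ (by omega : d.toNat ≠ (mofd_scan lis d).toNat)]
        rw [foldl_set_comm d.toNat "1" _ _
              (fun k hk => by
                have := (PySem.List.mem_pyRange_one).mp hk
                exact ⟨by omega, by omega⟩)]
        rw [PySem.List.pyRange_one_append (mofd_scan lis d + 1) d (d + 1) (by omega) (by omega)]
        rw [List.foldl_append]
        rw [show PySem.List.pyRange d (d + 1) = [d] from PySem.List.pyRange_one_singleton d]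
        rw [List.foldl_cons, List.foldl_nil,
            PySem.List.pySetD_of_nonneg _ _ (by omega : (0:Int) ≤ d)]
        rw [show d - 1 + 1 = d by ring]

theorem main_neg (lis : List String) (d : Int) (hneg : d < 0) :
    minus_one_from_digit lis d = minus_one_from_digit_alt lis d := by
  by_cases h1 : (PySem.List.pyGetD lis d "" == "1") = true
  · rw [minus_one_from_digit, if_pos h1, minus_one_from_digit_alt, if_pos h1]
  · have h2 : rest_are_zeros lis d = true := by
      rw [rest_are_zeros, PySem.List.pyRange_one_eq_nil (by omega : d ≤ 0)]
      rfl
    rw [minus_one_from_digit, if_neg h1, dif_pos h2, minus_one_from_digit_alt, if_neg h1]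
    rw [scan_neg lis (d - 1) (by omega), if_pos (by omega : d - 1 < 0)]

-- ===== VERDICT (by name: the statement is the Claim_ definition above) =====
theorem minus_one_from_digit_spec : Claim_equal_minus_one_from_digit := by
  intro lis d _ hp
  unfold Spec_minus_one_from_digit
  by_cases h0 : 0 ≤ d
  · rw [main_pos (d.toNat + 1) lis d (by omega) h0 hp.2, alt_eq_old lis d h0]
  · exact main_neg lis d (by omega)
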